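-- pv_equiv track=rewrite | github.com/stay-out-of-it/Codility | Challenges/Nickel2018.py | solution
-- ===== SOURCE A (Python) =====
-- def count(x):
--     return x*(x+1)//2
--
-- def solution(P):
--     c = 0
--     d = 0
--     for i in P:
--         if i == 0:
--             c += 1
--         else:
--             if c != 0:
--                 d += count(c)
--             c = 0
--     if c != 0:
--         d += count(c)
--     result = count(len(P)) - d
--     if result > 10**9:
--         return 10**9
--     else:
--         return count(len(P)) - d
-- ===== SOURCE B (Python) =====
-- def solution(P):
--     total = 0
--     last = -1
--     for j, x in enumerate(P):
--         if x != 0: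
--             last = j
--         total += last + 1
--     if total > 10**9:
--         return 10**9
--     return total
-- ===== Notes on version B (the rewrite author's own statement) =====
-- stated objective: alternative
-- what changed: Counts subarrays containing a nonzero directly in one pass by tracking the index of the most recent nonzero (adding last+1 per position), instead of counting zero-runs and subtracting their triangular numbers from the triangular total.
import Mathlib
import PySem

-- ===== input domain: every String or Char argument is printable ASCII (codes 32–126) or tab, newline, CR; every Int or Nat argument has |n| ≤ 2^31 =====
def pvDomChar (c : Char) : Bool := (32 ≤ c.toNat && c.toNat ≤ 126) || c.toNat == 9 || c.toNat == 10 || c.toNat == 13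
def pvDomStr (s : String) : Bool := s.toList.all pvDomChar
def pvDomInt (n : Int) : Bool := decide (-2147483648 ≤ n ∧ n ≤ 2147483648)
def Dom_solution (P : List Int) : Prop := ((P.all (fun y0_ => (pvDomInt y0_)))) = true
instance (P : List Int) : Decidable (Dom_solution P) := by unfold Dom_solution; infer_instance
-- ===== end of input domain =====

-- B counts nonzero-containing subarrays directly in one pass (tracking the last nonzero index)
-- instead of A's zero-run triangular-number subtraction; same O(n) cost, different decomposition.

-- ===== PORT A =====
def count (x : Int) : Int := PySem.Int.floordiv (x * (x + 1)) 2

def stepA (s : Int × Int) (i : Int) : Int × Int :=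
  if i == 0 then (s.1 + 1, s.2)
  else (0, if s.1 != 0 then s.2 + count s.1 else s.2)

def solution (P : List Int) : Int :=
  let cd := P.foldl stepA (0, 0)
  let d := if cd.1 != 0 then cd.2 + count cd.1 else cd.2
  let result := count (P.length : Int) - d
  if result > 10 ^ 9 then 10 ^ 9 else count (P.length : Int) - d

-- ===== PORT B =====
-- state: (j, last, total) for the enumerate loop
def stepB (s : Int × Int × Int) (x : Int) : Int × Int × Int :=
  let last := if x != 0 then s.1 else s.2.1
  (s.1 + 1, last, s.2.2 + (last + 1))

def solution_alt (P : List Int) : Int :=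
  let st := P.foldl stepB (0, -1, 0)
  if st.2.2 > 10 ^ 9 then 10 ^ 9 else st.2.2

-- ===== PRECONDITION & SPEC =====
def Spec_solution (P : List Int) (out : Int) : Prop := out = solution_alt P
instance (P : List Int) (out : Int) : Decidable (Spec_solution P out) := by unfold Spec_solution; infer_instance

-- ===== CLAIM (what is proved, stated in full; the proofs are below) =====
def Claim_equal_solution : Prop := ∀ (P : List Int), Dom_solution P → Spec_solution P (solution P)

-- ===== LEMMAS AND PROOFS =====

theorem two_mul_count (x : Int) : 2 * count x = x * (x + 1) := by
  obtain ⟨k, hk⟩ : (2 : Int) ∣ x * (x + 1) := Int.even_mul_succ_self x |>.two_dvd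
  unfold count
  rw [hk, PySem.Int.floordiv_eq_ediv_of_pos (by norm_num)]
  omega

theorem count_succ (x : Int) : count (x + 1) = count x + (x + 1) := by
  have h1 := two_mul_count x
  have h2 := two_mul_count (x + 1)
  nlinarith

theorem count_zero : count 0 = 0 := by decide

-- the final accumulation A performs after the loop (count 0 = 0 lets us drop the guard)
theorem finalD_eq (c d : Int) : (if c != 0 then d + count c else d) = d + count c := by
  by_cases h : c = 0
  · simp [h, count_zero]
  · simp [h]

theorem key (P : List Int) : ∀ (c d j last acc : Int),
    last = j - 1 - c → acc = count j - d - count c →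
    (P.foldl stepB (j, last, acc)).2.2 =
      count (j + (P.length : Int)) -
        ((P.foldl stepA (c, d)).2 + count (P.foldl stepA (c, d)).1) := by
  induction P with
  | nil =>
    intro c d j last acc hlast hacc
    simp [hacc]; ring
  | cons x rest ih =>
    intro c d j last acc hlast hacc
    simp only [List.foldl_cons]
    by_cases hx : x = 0
    · have hA : stepA (c, d) x = (c + 1, d) := by simp [stepA, hx]
      have hB : stepB (j, last, acc) x = (j + 1, last, acc + (last + 1)) := by
        simp [stepB, hx]
      rw [hA, hB, ih (c + 1) d (j + 1) last (acc + (last + 1))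
            (by omega) (by rw [hacc, count_succ j, count_succ c]; omega)]
      have : (j + ((x :: rest).length : Int)) = ((j + 1) + (rest.length : Int)) := by
        simp; ring
      rw [this]
    · have hA : stepA (c, d) x = (0, d + count c) := by
        by_cases hc : c = 0
        · simp [stepA, hx, hc, count_zero]
        · simp [stepA, hx, hc]
      have hB : stepB (j, last, acc) x = (j + 1, j, acc + (j + 1)) := by
        simp [stepB, hx]
      rw [hA, hB, ih 0 (d + count c) (j + 1) j (acc + (j + 1))
            (by omega) (by rw [hacc, count_succ j, count_zero]; ring)]
      have : (j + ((x :: rest).length : Int)) = ((j + 1) + (rest.length : Int)) := by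
        simp; ring
      rw [this]

-- ===== VERDICT (by name: the statement is the Claim_ definition above) =====
theorem solution_spec : Claim_equal_solution := by
  intro P _
  unfold Spec_solution solution solution_alt
  have hk := key P 0 0 0 (-1) 0 (by norm_num) (by simp [count_zero])
  simp only [finalD_eq]
  rw [hk, zero_add]
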